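-- pv_equiv track=rewrite | github.com/binlife0303/- | A.py | check
-- ===== SOURCE A (Python) =====
-- def check(s):
--     longZero = 0
--     longOne = 0
--     currentZero = 0
--     currentOne = 0
--     for char in s:
--         if char == "1":
--             currentOne+=1
--             longOne = max(longOne, currentOne)
--             currentZero = 0
--         else:
--             currentZero+=1
--             longZero = max(longZero, currentZero)
--             currentOne = 0
--     if (longOne > longZero):
--         return True
--     return False
-- ===== SOURCE B (Python) =====
-- def check(s):
--     longOne = 0
--     longZero = 0
--     chars = list(s)
--     while chars:
--         one = chars[0] == "1"
--         run = 1
--         while run < len(chars) and (chars[run] == "1") == one: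
--             run += 1
--         if one:
--             longOne = max(longOne, run)
--         else:
--             longZero = max(longZero, run)
--         chars = chars[run:]
--     return longOne > longZero
-- ===== Notes on version B (the rewrite author's own statement) =====
-- stated objective: alternative
-- what changed: Replaces A's four-counter running state machine with a run-splitting loop: each maximal run of equal-keyed characters is measured as a block and folded into the two maxima.
import Mathlib
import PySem

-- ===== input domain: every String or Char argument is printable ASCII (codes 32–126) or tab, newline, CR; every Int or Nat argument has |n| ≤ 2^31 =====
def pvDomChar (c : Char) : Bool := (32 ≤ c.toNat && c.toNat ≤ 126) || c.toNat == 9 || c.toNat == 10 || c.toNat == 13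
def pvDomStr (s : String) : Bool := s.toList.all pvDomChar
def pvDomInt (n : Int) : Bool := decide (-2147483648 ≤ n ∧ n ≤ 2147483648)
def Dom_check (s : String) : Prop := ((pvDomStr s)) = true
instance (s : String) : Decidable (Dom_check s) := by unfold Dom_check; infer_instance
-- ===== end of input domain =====

-- B replaces A's four-counter state machine by a run-splitting loop over maximal runs; objective: alternative.

-- ===== PORT A =====
-- state = (longZero, longOne, currentZero, currentOne), exactly A's four counters
def checkStep (st : Nat × Nat × Nat × Nat) (c : Char) : Nat × Nat × Nat × Nat :=
  if c == '1' then (st.1, max st.2.1 (st.2.2.2 + 1), 0, st.2.2.2 + 1)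
  else (max st.1 (st.2.2.1 + 1), st.2.1, st.2.2.1 + 1, 0)

def check (s : String) : Bool :=
  let st := s.toList.foldl checkStep (0, 0, 0, 0)
  if st.2.1 > st.1 then true else false

-- ===== PORT B =====
-- one step per maximal run: measure the run, update the matching maximum, drop the run
def checkRuns : List Char → Nat → Nat → Bool
  | [], longOne, longZero => longOne > longZero
  | c :: rest, longOne, longZero =>
      let one := c == '1'
      let run := 1 + (rest.takeWhile (fun d => (d == '1') == one)).length
      let rest' := rest.dropWhile (fun d => (d == '1') == one)
      if one then checkRuns rest' (max longOne run) longZero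
      else checkRuns rest' longOne (max longZero run)
  termination_by l _ _ => l.length
  decreasing_by
    all_goals
      simpa [rest'] using Nat.lt_succ_of_le (List.length_dropWhile_le _ _)

def check_alt (s : String) : Bool := checkRuns s.toList 0 0

-- ===== PRECONDITION & SPEC =====
def Spec_check (s : String) (out : Bool) : Prop := out = check_alt s
instance (s : String) (out : Bool) : Decidable (Spec_check s out) := by unfold Spec_check; infer_instance

-- ===== CLAIM (what is proved, stated in full; the proofs are below) =====
def Claim_equal_check : Prop := ∀ (s : String), Dom_check s → Spec_check s (check s)

-- ===== LEMMAS AND PROOFS =====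

-- folding A's step over a run of '1's with currentZero = 0
lemma fold_ones (l : List Char) (lz lo co : Nat) (hall : ∀ c ∈ l, c = '1') (hco : co ≤ lo) :
    l.foldl checkStep (lz, lo, 0, co) = (lz, max lo (co + l.length), 0, co + l.length) := by
  induction l generalizing lo co with
  | nil => simp [Nat.max_eq_left hco]
  | cons c t ih =>
      have hc : c = '1' := hall c (by simp)
      have h1 : ∀ d ∈ t, d = '1' := fun d hd => hall d (by simp [hd])
      simp only [List.foldl_cons, checkStep, hc]
      simp only [beq_self_eq_true, if_true]
      rw [ih _ _ h1 (Nat.le_max_right _ _)]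
      have : max (max lo (co + 1)) (co + 1 + t.length) = max lo (co + (t.length + 1)) := by omega
      simp [this]; omega

-- folding A's step over a run of non-'1's with currentOne = 0
lemma fold_zeros (l : List Char) (lz lo cz : Nat) (hall : ∀ c ∈ l, c ≠ '1') (hcz : cz ≤ lz) :
    l.foldl checkStep (lz, lo, cz, 0) = (max lz (cz + l.length), lo, cz + l.length, 0) := by
  induction l generalizing lz cz with
  | nil => simp [Nat.max_eq_left hcz]
  | cons c t ih =>
      have hc : c ≠ '1' := hall c (by simp)
      have h1 : ∀ d ∈ t, d ≠ '1' := fun d hd => hall d (by simp [hd])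
      simp only [List.foldl_cons, checkStep]
      rw [if_neg (by simpa using hc)]
      rw [ih _ _ h1 (Nat.le_max_right _ _)]
      have : max (max lz (cz + 1)) (cz + 1 + t.length) = max lz (cz + (t.length + 1)) := by omega
      simp [this]; omega

-- starting a new run resets the opposite counter, so it may be taken as 0
lemma step_forget_co (lz lo co : Nat) (e : Char) (he : e ≠ '1') :
    checkStep (lz, lo, 0, co) e = checkStep (lz, lo, 0, 0) e := by
  simp [checkStep, he]

lemma step_forget_cz (lz lo cz : Nat) (e : Char) (he : e = '1') :
    checkStep (lz, lo, cz, 0) e = checkStep (lz, lo, 0, 0) e := by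
  simp [checkStep, he]

lemma main_bridge (n : Nat) : ∀ (l : List Char), l.length ≤ n → ∀ (lz lo : Nat),
    (decide ((l.foldl checkStep (lz, lo, 0, 0)).2.1 > (l.foldl checkStep (lz, lo, 0, 0)).1))
      = checkRuns l lo lz := by
  induction n with
  | zero =>
      intro l hl lz lo
      have : l = [] := List.eq_nil_of_length_eq_zero (Nat.le_zero.mp hl)
      subst this
      simp [checkRuns]
  | succ n ih =>
      intro l hl lz lo
      match l with
      | [] => simp [checkRuns]
      | c :: rest =>
        set p : Char → Bool := fun d => (d == '1') == (c == '1') with hp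
        have hdrop : (rest.dropWhile p).length ≤ n := by
          have := List.length_dropWhile_le p rest
          simp at hl; omega
        by_cases hc : c = '1'
        · -- a run of '1's
          have hall : ∀ d ∈ rest.takeWhile p, d = '1' := by
            intro d hd
            have := List.mem_takeWhile_imp hd
            simpa [hp, hc] using this
          have h1 : (c :: rest.takeWhile p).foldl checkStep (lz, lo, 0, 0)
              = (lz, max lo (1 + (rest.takeWhile p).length), 0, 1 + (rest.takeWhile p).length) := by
            simp only [List.foldl_cons, checkStep, hc, beq_self_eq_true, if_true]
            rw [fold_ones _ _ _ _ hall (Nat.le_max_right _ _)]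
            have h2 : max (max lo (0 + 1)) (0 + 1 + (rest.takeWhile p).length)
                = max lo (1 + (rest.takeWhile p).length) := by omega
            have h3 : (0 : Nat) + 1 + (rest.takeWhile p).length
                = 1 + (rest.takeWhile p).length := by omega
            rw [h2, h3]
          have hsplit : (c :: rest).foldl checkStep (lz, lo, 0, 0)
              = (rest.dropWhile p).foldl checkStep
                  (lz, max lo (1 + (rest.takeWhile p).length), 0,
                    1 + (rest.takeWhile p).length) := by
            conv_lhs => rw [← List.takeWhile_append_dropWhile (p := p) (l := rest)]
            rw [show c :: (rest.takeWhile p ++ rest.dropWhile p)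
                  = (c :: rest.takeWhile p) ++ rest.dropWhile p from rfl]
            rw [List.foldl_append, h1]
          have hproj : ∀ co,
              ((rest.dropWhile p).foldl checkStep
                  (lz, max lo (1 + (rest.takeWhile p).length), 0, co)).1
                = ((rest.dropWhile p).foldl checkStep
                  (lz, max lo (1 + (rest.takeWhile p).length), 0, 0)).1
              ∧ ((rest.dropWhile p).foldl checkStep
                  (lz, max lo (1 + (rest.takeWhile p).length), 0, co)).2.1
                = ((rest.dropWhile p).foldl checkStep
                  (lz, max lo (1 + (rest.takeWhile p).length), 0, 0)).2.1 := by
            intro co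
            rcases hdd : rest.dropWhile p with _ | ⟨e, d'⟩
            · exact ⟨rfl, rfl⟩
            · have he : e ≠ '1' := by
                have := List.head?_dropWhile_not p rest
                rw [hdd] at this
                simp [hp, hc] at this
                exact this
              simp only [List.foldl_cons]
              rw [step_forget_co _ _ _ _ he]
              exact ⟨rfl, rfl⟩
          rw [hsplit, (hproj _).1, (hproj _).2, ih _ hdrop]
          conv_rhs => rw [checkRuns]
          simp [hp, hc]
        · -- a run of non-'1's
          have hall : ∀ d ∈ rest.takeWhile p, d ≠ '1' := by
            intro d hd
            have := List.mem_takeWhile_imp hd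
            simpa [hp, hc] using this
          have h1 : (c :: rest.takeWhile p).foldl checkStep (lz, lo, 0, 0)
              = (max lz (1 + (rest.takeWhile p).length), lo,
                  1 + (rest.takeWhile p).length, 0) := by
            simp only [List.foldl_cons, checkStep]
            rw [if_neg (by simpa using hc)]
            rw [fold_zeros _ _ _ _ hall (Nat.le_max_right _ _)]
            have h2 : max (max lz (0 + 1)) (0 + 1 + (rest.takeWhile p).length)
                = max lz (1 + (rest.takeWhile p).length) := by omega
            have h3 : (0 : Nat) + 1 + (rest.takeWhile p).length
                = 1 + (rest.takeWhile p).length := by omega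
            rw [h2, h3]
          have hsplit : (c :: rest).foldl checkStep (lz, lo, 0, 0)
              = (rest.dropWhile p).foldl checkStep
                  (max lz (1 + (rest.takeWhile p).length), lo,
                    1 + (rest.takeWhile p).length, 0) := by
            conv_lhs => rw [← List.takeWhile_append_dropWhile (p := p) (l := rest)]
            rw [show c :: (rest.takeWhile p ++ rest.dropWhile p)
                  = (c :: rest.takeWhile p) ++ rest.dropWhile p from rfl]
            rw [List.foldl_append, h1]
          have hproj : ∀ cz,
              ((rest.dropWhile p).foldl checkStep
                  (max lz (1 + (rest.takeWhile p).length), lo, cz, 0)).1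
                = ((rest.dropWhile p).foldl checkStep
                  (max lz (1 + (rest.takeWhile p).length), lo, 0, 0)).1
              ∧ ((rest.dropWhile p).foldl checkStep
                  (max lz (1 + (rest.takeWhile p).length), lo, cz, 0)).2.1
                = ((rest.dropWhile p).foldl checkStep
                  (max lz (1 + (rest.takeWhile p).length), lo, 0, 0)).2.1 := by
            intro cz
            rcases hdd : rest.dropWhile p with _ | ⟨e, d'⟩
            · exact ⟨rfl, rfl⟩
            · have he : e = '1' := by
                have := List.head?_dropWhile_not p rest
                rw [hdd] at this
                simp [hp, hc] at this
                exact this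
              simp only [List.foldl_cons]
              rw [step_forget_cz _ _ _ _ he]
              exact ⟨rfl, rfl⟩
          rw [hsplit, (hproj _).1, (hproj _).2, ih _ hdrop]
          conv_rhs => rw [checkRuns]
          simp [hp, hc]

-- ===== VERDICT (by name: the statement is the Claim_ definition above) =====
theorem check_spec : Claim_equal_check := by
  intro s _
  unfold Spec_check check check_alt
  have h := main_bridge s.toList.length s.toList (Nat.le_refl _) 0 0
  simp only [gt_iff_lt] at h ⊢
  rw [← h]
  split <;> simp_all
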